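-- pv_equiv track=rewrite | github.com/Tharun-Karimilla/postgressqitch | lint_checker2.py | find_missing_column_requires
-- ===== SOURCE A (Python) =====
-- def find_missing_column_requires(steps, dependencies, column_defs):
--     warnings = []
--     for i, step in enumerate(steps):
--         if step not in column_defs:
--             continue
--         for column in column_defs[step]:
--             for j in range(i):
--                 prev_step = steps[j]
--                 if column in column_defs[prev_step]:
--                     if prev_step not in dependencies.get(step, []):
--                         warnings.append((step, column, prev_step))
--     return warnings
-- ===== SOURCE B (Python) =====
-- def find_missing_column_requires(steps, dependencies, column_defs):
--     warnings = []
--     col_index = {}  # column -> earlier steps (in order) whose definition contains it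
--     for step in steps:
--         cols = column_defs.get(step, [])
--         deps = set(dependencies.get(step, []))
--         for column in cols:
--             for prev in col_index.get(column, []):
--                 if prev not in deps:
--                     warnings.append((step, column, prev))
--         for column in dict.fromkeys(cols):
--             col_index[column] = col_index.get(column, []) + [step]
--     return warnings
-- ===== Notes on version B (the rewrite author's own statement) =====
-- stated objective: faster
-- what changed: Instead of rescanning all earlier steps for every column of every step (A's nested j-loop), B maintains an incremental index column -> list of earlier defining steps and a per-step dependency set, so each warning is found by direct lookup.
-- crash fix: A raises KeyError when a step with a non-empty column_defs entry is preceded by a step that is not a key of column_defs; B simply skips such undeclared earlier steps (they define no columns) and returns the warnings. — e.g. on find_missing_column_requires(["x", "a"], [], [("a", ["c"])]): A raises KeyError, B returns []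
import Mathlib
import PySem

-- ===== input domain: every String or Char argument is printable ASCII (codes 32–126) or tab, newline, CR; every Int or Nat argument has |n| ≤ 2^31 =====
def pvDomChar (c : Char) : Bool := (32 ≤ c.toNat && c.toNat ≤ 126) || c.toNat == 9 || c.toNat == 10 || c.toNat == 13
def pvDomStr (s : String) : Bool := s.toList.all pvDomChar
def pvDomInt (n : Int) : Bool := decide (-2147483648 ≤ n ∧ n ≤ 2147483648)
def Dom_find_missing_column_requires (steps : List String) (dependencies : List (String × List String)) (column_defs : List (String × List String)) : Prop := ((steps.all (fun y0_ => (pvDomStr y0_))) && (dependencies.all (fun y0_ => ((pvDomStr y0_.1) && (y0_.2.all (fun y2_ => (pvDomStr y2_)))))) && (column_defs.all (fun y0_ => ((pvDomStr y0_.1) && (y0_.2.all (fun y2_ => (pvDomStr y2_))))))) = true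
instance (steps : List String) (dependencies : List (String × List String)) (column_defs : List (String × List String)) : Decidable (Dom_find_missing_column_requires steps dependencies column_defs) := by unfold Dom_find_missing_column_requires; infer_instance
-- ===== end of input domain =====

-- B replaces A's rescan of all earlier steps per column by an incremental index
-- column -> earlier defining steps plus a per-step dependency set (objective: faster).

-- ===== PORT A =====
-- loop body of A's outer 'for i, step in enumerate(steps)' loop
def pvBodyA (steps : List String) (dependencies : List (String × List String)) (column_defs : List (String × List String)) (warnings : List (String × String × String)) (p : Int × String) : List (String × String × String) :=
  match column_defs.lookup p.2 with
  | none => warnings                      -- 'if step not in column_defs: continue'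
  | some cols =>
    cols.foldl (fun w column =>
      (PySem.List.pyRange 0 p.1 1).foldl (fun w j =>
        let prev_step := PySem.List.pyGetD steps j ""   -- steps[j], 0 ≤ j < i < len(steps)
        match column_defs.lookup prev_step with
        | none => w                       -- Python raises KeyError here: excluded by Pre_
        | some pcols =>
          if column ∈ pcols then
            if prev_step ∈ (dependencies.lookup p.2).getD [] then w
            else w ++ [(p.2, column, prev_step)]
          else w) w) warnings

def find_missing_column_requires (steps : List String) (dependencies : List (String × List String)) (column_defs : List (String × List String)) : List (String × String × String) :=
  (PySem.List.enumerate steps 0).foldl (pvBodyA steps dependencies column_defs) []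

-- ===== PORT B =====
-- loop body of B's 'for step in steps' loop; state = (warnings, col_index)
def pvBodyB (dependencies : List (String × List String)) (column_defs : List (String × List String)) (st : List (String × String × String) × PySem.Dict String (List String)) (step : String) : List (String × String × String) × PySem.Dict String (List String) :=
  let cols := (column_defs.lookup step).getD []
  let deps : PySem.Set String := PySem.Set.ofList ((dependencies.lookup step).getD [])
  let w := cols.foldl (fun w column =>
      (st.2.getD column []).foldl (fun w prev =>
        if prev ∈ deps then w else w ++ [(step, column, prev)]) w) st.1
  let idx := (PySem.List.dedup cols).foldl (fun d column =>
      d.modify column [] (fun l => l ++ [step])) st.2    -- col_index[column] = col_index.get(column, []) + [step]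
  (w, idx)

def find_missing_column_requires_alt (steps : List String) (dependencies : List (String × List String)) (column_defs : List (String × List String)) : List (String × String × String) :=
  (steps.foldl (pvBodyB dependencies column_defs) (([] : List (String × String × String)), (PySem.Dict.empty : PySem.Dict String (List String)))).1

-- ===== PRECONDITION & SPEC =====
-- Pre_ excludes exactly the inputs on which the Python A raises KeyError: some step with a
-- non-empty column_defs entry is preceded by a step that is not a key of column_defs.
def Pre_find_missing_column_requires (steps : List String) (dependencies : List (String × List String)) (column_defs : List (String × List String)) : Prop :=
  ∀ (i j : Fin steps.length), (j : Nat) < (i : Nat) →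
    (column_defs.lookup steps[i]).getD [] ≠ [] →
    (column_defs.lookup steps[j]).isSome = true
instance (steps : List String) (dependencies : List (String × List String)) (column_defs : List (String × List String)) : Decidable (Pre_find_missing_column_requires steps dependencies column_defs) := by unfold Pre_find_missing_column_requires; infer_instance

def pvWitness_find_missing_column_requires : List String × (List (String × List String)) × (List (String × List String)) :=
  (["a", "b"], [("b", ["a"])], [("a", ["c"]), ("b", ["c"])])

-- A raises KeyError when a step with a non-empty column_defs entry is preceded by a step that is
-- not a key of column_defs; B skips such undeclared earlier steps (they define no columns) and returns.
def Raises_find_missing_column_requires (steps : List String) (dependencies : List (String × List String)) (column_defs : List (String × List String)) : Prop :=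
  ∃ (i j : Fin steps.length), (j : Nat) < (i : Nat) ∧
    (column_defs.lookup steps[i]).getD [] ≠ [] ∧
    (column_defs.lookup steps[j]).isSome = false
instance (steps : List String) (dependencies : List (String × List String)) (column_defs : List (String × List String)) : Decidable (Raises_find_missing_column_requires steps dependencies column_defs) := by unfold Raises_find_missing_column_requires; infer_instance

def pvRaiseWitness_find_missing_column_requires : List String × (List (String × List String)) × (List (String × List String)) :=
  (["x", "a"], [], [("a", ["c"])])
def pvRaiseWitnessOut_find_missing_column_requires : List (String × String × String) := []

def Spec_find_missing_column_requires (steps : List String) (dependencies : List (String × List String)) (column_defs : List (String × List String)) (out : List (String × String × String)) : Prop := out = find_missing_column_requires_alt steps dependencies column_defs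
instance (steps : List String) (dependencies : List (String × List String)) (column_defs : List (String × List String)) (out : List (String × String × String)) : Decidable (Spec_find_missing_column_requires steps dependencies column_defs out) := by unfold Spec_find_missing_column_requires; infer_instance

-- ===== CLAIM (what is proved, stated in full; the proofs are below) =====
def Claim_equal_find_missing_column_requires : Prop := ∀ (steps : List String) (dependencies : List (String × List String)) (column_defs : List (String × List String)), Dom_find_missing_column_requires steps dependencies column_defs → Pre_find_missing_column_requires steps dependencies column_defs → Spec_find_missing_column_requires steps dependencies column_defs (find_missing_column_requires steps dependencies column_defs)

def Claim_raises_find_missing_column_requires : Prop := (∀ (steps : List String) (dependencies : List (String × List String)) (column_defs : List (String × List String)), Dom_find_missing_column_requires steps dependencies column_defs → Raises_find_missing_column_requires steps dependencies column_defs → ¬ Pre_find_missing_column_requires steps dependencies column_defs) ∧ (Dom_find_missing_column_requires (pvRaiseWitness_find_missing_column_requires.1) (pvRaiseWitness_find_missing_column_requires.2.1) (pvRaiseWitness_find_missing_column_requires.2.2) ∧ Raises_find_missing_column_requires (pvRaiseWitness_find_missing_column_requires.1) (pvRaiseWitness_find_missing_column_requires.2.1) (pvRaiseWitness_find_missing_column_requires.2.2)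 ∧ find_missing_column_requires_alt (pvRaiseWitness_find_missing_column_requires.1) (pvRaiseWitness_find_missing_column_requires.2.1) (pvRaiseWitness_find_missing_column_requires.2.2) = pvRaiseWitnessOut_find_missing_column_requires)

-- ===== LEMMAS AND PROOFS =====

-- helpers used only by the proofs
def pvDefs (column_defs : List (String × List String)) (s : String) : List String :=
  (column_defs.lookup s).getD []

-- what one step contributes to the warnings, given the list of steps before it
def pvEmit (dependencies column_defs : List (String × List String)) (pre : List String) (step : String) (w : List (String × String × String)) : List (String × String × String) :=
  (pvDefs column_defs step).foldl (fun w c =>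
    (pre.filter (fun p => decide (c ∈ pvDefs column_defs p))).foldl
      (fun w p => if p ∈ (dependencies.lookup step).getD [] then w else w ++ [(step, c, p)]) w) w

lemma pvBodyA_eq (dp ds : List (String × List String)) (pre suffix : List String) (s : String) (w : List (String × String × String)) :
    pvBodyA (pre ++ s :: suffix) dp ds w ((pre.length : Int), s) = pvEmit dp ds pre s w := by
  unfold pvBodyA pvEmit pvDefs
  cases h : ds.lookup s with
  | none => simp
  | some cols =>
    simp only [Option.getD_some]
    apply PySem.List.foldl_congr_mem
    intro acc c _
    have e1 : (PySem.List.pyRange 0 (pre.length : Int)).foldl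
        (fun w j =>
          let prev_step := PySem.List.pyGetD (pre ++ s :: suffix) j ""
          match ds.lookup prev_step with
          | none => w
          | some pcols =>
            if c ∈ pcols then
              if prev_step ∈ (dp.lookup s).getD [] then w
              else w ++ [(s, c, prev_step)]
            else w) acc
      = (PySem.List.pyRange 0 (pre.length : Int)).foldl
        (fun w j =>
          (fun w prev_step =>
            match ds.lookup prev_step with
            | none => w
            | some pcols =>
              if c ∈ pcols then
                if prev_step ∈ (dp.lookup s).getD [] then w
                else w ++ [(s, c, prev_step)]
              else w) w (PySem.List.pyGetD pre j "")) acc := by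
      apply PySem.List.foldl_congr_mem
      intro a j hj
      have hj' := PySem.List.mem_pyRange_one.mp hj
      have hget : PySem.List.pyGetD (pre ++ s :: suffix) j "" = PySem.List.pyGetD pre j "" := by
        rw [PySem.List.pyGetD_eq_getElem _ "" hj'.1 (by simp [List.length_append]; omega),
            PySem.List.pyGetD_eq_getElem _ "" hj'.1 (by exact_mod_cast hj'.2)]
        have hlt : j.toNat < pre.length := by omega
        rw [List.getElem_append_left hlt]
      simp only [hget]
    rw [e1]
    rw [PySem.List.foldl_pyRange_zero_pyGetD' pre ""
      (fun w prev_step =>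
        match ds.lookup prev_step with
        | none => w
        | some pcols =>
          if c ∈ pcols then
            if prev_step ∈ (dp.lookup s).getD [] then w
            else w ++ [(s, c, prev_step)]
          else w) acc]
    rw [List.foldl_filter]
    apply PySem.List.foldl_congr_mem
    intro a p _
    cases hp : ds.lookup p with
    | none => simp
    | some pcols => simp

lemma pvIdxUpdate (s : String) (L : List String) (hnd : L.Nodup) :
    ∀ (d : PySem.Dict String (List String)) (c : String),
    (L.foldl (fun d column => d.modify column [] (fun l => l ++ [s])) d).getD c []
      = if c ∈ L then d.getD c [] ++ [s] else d.getD c [] := by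
  induction L with
  | nil => intro d c; simp
  | cons a L ih =>
    intro d c
    have hna : a ∉ L := (List.nodup_cons.mp hnd).1
    have hL : L.Nodup := (List.nodup_cons.mp hnd).2
    simp only [List.foldl_cons]
    rw [ih hL]
    by_cases hca : c = a
    · subst hca
      simp [hna]
    · simp [PySem.Dict.getD_modify, hca, List.mem_cons]

lemma pvBodyB_fst (dp ds : List (String × List String)) (pre : List String) (s : String) (w : List (String × String × String)) (idx : PySem.Dict String (List String))
    (hinv : ∀ c, idx.getD c [] = pre.filter (fun p => decide (c ∈ pvDefs ds p))) :
    (pvBodyB dp ds (w, idx) s).1 = pvEmit dp ds pre s w := by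
  unfold pvBodyB pvEmit pvDefs
  simp only []
  apply PySem.List.foldl_congr_mem
  intro acc c _
  rw [hinv c]
  apply PySem.List.foldl_congr_mem
  intro a p _
  simp [PySem.Set.mem_ofList]

lemma pvBodyB_snd (dp ds : List (String × List String)) (pre : List String) (s : String) (w : List (String × String × String)) (idx : PySem.Dict String (List String))
    (hinv : ∀ c, idx.getD c [] = pre.filter (fun p => decide (c ∈ pvDefs ds p))) :
    ∀ c, (pvBodyB dp ds (w, idx) s).2.getD c []
      = (pre ++ [s]).filter (fun p => decide (c ∈ pvDefs ds p)) := by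
  intro c
  unfold pvBodyB
  simp only []
  rw [pvIdxUpdate s _ (PySem.List.nodup_dedup _)]
  rw [hinv c]
  by_cases hc : c ∈ pvDefs ds s
  · simp [List.filter_append, pvDefs] at hc ⊢
    simp [hc]
  · simp [List.filter_append, pvDefs] at hc ⊢
    simp [hc]

lemma pvMain (dp ds : List (String × List String)) :
    ∀ (suffix pre : List String) (w : List (String × String × String)) (idx : PySem.Dict String (List String)),
    (∀ c, idx.getD c [] = pre.filter (fun p => decide (c ∈ pvDefs ds p))) →
    (PySem.List.enumerate suffix (pre.length : Int)).foldl (pvBodyA (pre ++ suffix) dp ds) w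
      = (suffix.foldl (pvBodyB dp ds) (w, idx)).1 := by
  intro suffix
  induction suffix with
  | nil => intro pre w idx _; simp [PySem.List.enumerate]
  | cons s rest ih =>
    intro pre w idx hinv
    rw [PySem.List.enumerate_cons]
    simp only [List.foldl_cons]
    rw [pvBodyA_eq]
    have hlen : (pre.length : Int) + 1 = (((pre ++ [s]).length : Nat) : Int) := by
      push_cast [List.length_append]; simp
    rw [hlen, List.append_cons]
    have h1 : pvBodyB dp ds (w, idx) s = (pvEmit dp ds pre s w, (pvBodyB dp ds (w, idx) s).2) := by
      refine Prod.ext_iff.mpr ⟨?_, rfl⟩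
      exact pvBodyB_fst dp ds pre s w idx hinv
    rw [h1]
    exact ih (pre ++ [s]) _ _ (pvBodyB_snd dp ds pre s w idx hinv)

-- ===== VERDICT (by name: the statement is the Claim_ definition above) =====
theorem find_missing_column_requires_spec : Claim_equal_find_missing_column_requires := by
  intro steps dp ds _ _
  unfold Spec_find_missing_column_requires find_missing_column_requires find_missing_column_requires_alt
  have h := pvMain dp ds steps [] [] PySem.Dict.empty (fun c => by simp)
  simpa using h

@[simp] theorem find_missing_column_requires_raises : Claim_raises_find_missing_column_requires := by
  unfold Claim_raises_find_missing_column_requires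
  refine ⟨?_, by decide⟩
  rintro steps dp ds _ ⟨i, j, hij, h1, h2⟩ hpre
  have h := hpre i j hij h1
  rw [h2] at h
  exact Bool.false_ne_true h
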